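-- pv_equiv track=rewrite | github.com/greivinlopez/coding-solutions | python/leetcode/problems_1300_1399/1300_sum_of_mutated_array_closest_to_target.py | find_best_value
-- ===== SOURCE A (Python) =====
-- from itertools import accumulate
-- from bisect import bisect_right
--
-- def find_best_value(arr, target):
--     # Sort the array for binary search and prefix sum calculation
--     arr.sort()
--
--     # Create prefix sum array with initial 0 for easier indexing
--     # prefix_sums[i] represents sum of first i elements
--     prefix_sums = list(accumulate(arr, initial=0))
--
--     # Initialize variables to track the best value and minimum difference
--     best_value = 0
--     min_difference = float('inf')
--
--     # Try all possible values from 0 to max element in array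
--     for candidate_value in range(max(arr) + 1):
--         # Find the index where candidate_value would be inserted
--         # This gives us the count of elements <= candidate_value
--         index = bisect_right(arr, candidate_value)
--
--         # Calculate the sum after replacing all elements > candidate_value
--         # Sum = (sum of elements <= candidate_value) + (count of elements > candidate_value) * candidate_value
--         current_sum = prefix_sums[index] + (len(arr) - index) * candidate_value
--
--         # Calculate absolute difference from target
--         current_difference = abs(current_sum - target)
--
--         # Update best value if we found a smaller difference
--         if current_difference < min_difference:
--             min_difference = current_difference
--             best_value = candidate_value
--
--     return best_value
-- ===== SOURCE B (Python) =====
-- def find_best_value(arr, target):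
--     # Binary search over the candidate cap value (capped sum is monotone in the cap).
--     # Return value only: A sorts arr in place, B does not mutate arr.
--     def capped(v):
--         return sum(x if x <= v else v for x in arr)
--
--     lo, hi = 0, max(max(arr), 0)
--     while lo < hi:
--         mid = (lo + hi) // 2
--         if capped(mid) < target:
--             lo = mid + 1
--         else:
--             hi = mid
--     if lo > 0 and abs(capped(lo - 1) - target) <= abs(capped(lo) - target):
--         return lo - 1
--     return lo
-- ===== Notes on version B (the rewrite author's own statement) =====
-- stated objective: faster
-- what changed: A sorts, builds prefix sums and linearly scans every candidate cap in range(max(arr)+1) with bisect; B binary-searches the cap value directly (the capped sum is strictly monotone in the cap), then compares the two boundary candidates, with no sort and no prefix array.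
import Mathlib
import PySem

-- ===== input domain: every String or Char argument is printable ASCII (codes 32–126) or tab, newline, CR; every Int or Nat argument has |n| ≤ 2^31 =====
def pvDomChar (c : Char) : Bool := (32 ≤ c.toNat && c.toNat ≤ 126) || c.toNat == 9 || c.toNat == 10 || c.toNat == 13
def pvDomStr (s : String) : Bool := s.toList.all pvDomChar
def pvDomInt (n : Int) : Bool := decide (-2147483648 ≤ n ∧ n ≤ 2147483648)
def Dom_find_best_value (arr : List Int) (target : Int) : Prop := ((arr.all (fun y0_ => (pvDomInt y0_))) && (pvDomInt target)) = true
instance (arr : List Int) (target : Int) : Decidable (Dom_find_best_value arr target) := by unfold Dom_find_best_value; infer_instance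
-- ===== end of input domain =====

-- B replaces A's linear scan over every candidate cap in range(max(arr)+1) by a binary search
-- over the cap value (the capped sum is monotone in the cap), checking the two boundary
-- candidates at the end; equivalence is about the RETURN value only (A sorts arr in place, B
-- does not mutate arr).

-- ===== PORT A =====
-- A's library calls are ported as the corresponding exact functions: bisect_right →
-- PySem.List.bisectRight, max → PySem.List.max?, accumulate(arr, initial=0) → List.scanl (·+·) 0;
-- float('inf') for min_difference is Option Int with none = inf (none always compares greater).
def find_best_value (arr : List Int) (target : Int) : Int :=
  let s := PySem.List.sorted arr (fun x => x)          -- arr.sort()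
  let prefix_sums := s.scanl (· + ·) 0                 -- list(accumulate(arr, initial=0))
  let m := (PySem.List.max? s (fun x => x)).getD 0     -- max(arr); arr = [] raises → outside Pre_
  ((PySem.List.pyRange 0 (m + 1) 1).foldl
    (fun (st : Int × Option Int) candidate_value =>
      let index : Nat := PySem.List.bisectRight s candidate_value
      let current_sum := PySem.List.pyGetD prefix_sums (index : Int) 0 +
        (PySem.List.len s - (index : Int)) * candidate_value
      let current_difference := |current_sum - target|
      match st.2 with
      | none => (candidate_value, some current_difference)
      | some md =>
          if current_difference < md then (candidate_value, some current_difference) else st)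
    (0, none)).1

-- ===== PORT B =====
-- capped(v) = sum(x if x <= v else v for x in arr)
def altCapped (arr : List Int) (v : Int) : Int :=
  (arr.map (fun x => if x ≤ v then x else v)).sum

-- the while-loop: binary search for the smallest v in [lo, hi] with capped(v) >= target
def altSearch (arr : List Int) (target lo hi : Int) : Int :=
  if h : lo < hi then
    let mid := PySem.Int.floordiv (lo + hi) 2
    if altCapped arr mid < target then altSearch arr target (mid + 1) hi
    else altSearch arr target lo mid
  else lo
termination_by (hi - lo).toNat
decreasing_by
  · have h1 := PySem.Int.floordiv_two_mid_bounds (le_of_lt h)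
    have h2 : PySem.Int.floordiv (lo + hi) 2 < hi :=
      (PySem.Int.floordiv_lt_iff_lt_mul (by omega)).mpr (by omega)
    omega
  · have h1 := PySem.Int.floordiv_two_mid_bounds (le_of_lt h)
    have h2 : PySem.Int.floordiv (lo + hi) 2 < hi :=
      (PySem.Int.floordiv_lt_iff_lt_mul (by omega)).mpr (by omega)
    omega

def find_best_value_alt (arr : List Int) (target : Int) : Int :=
  let hi := max ((PySem.List.max? arr (fun x => x)).getD 0) 0   -- max(max(arr), 0)
  let lo := altSearch arr target 0 hi
  if 0 < lo ∧ |altCapped arr (lo - 1) - target| ≤ |altCapped arr lo - target| then lo - 1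
  else lo

-- ===== PRECONDITION & SPEC =====
-- Pre_ excludes only the empty list, on which A's max(arr) raises ValueError.
def Pre_find_best_value (arr : List Int) (target : Int) : Prop := arr ≠ []
instance (arr : List Int) (target : Int) : Decidable (Pre_find_best_value arr target) := by
  unfold Pre_find_best_value; infer_instance

def pvWitness_find_best_value : List Int × Int := ([2, 7, 1, 4], 9)

def Spec_find_best_value (arr : List Int) (target : Int) (out : Int) : Prop := out = find_best_value_alt arr target
instance (arr : List Int) (target : Int) (out : Int) : Decidable (Spec_find_best_value arr target out) := by unfold Spec_find_best_value; infer_instance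

-- ===== CLAIM (what is proved, stated in full; the proofs are below) =====
def Claim_equal_find_best_value : Prop := ∀ (arr : List Int) (target : Int), Dom_find_best_value arr target → Pre_find_best_value arr target → Spec_find_best_value arr target (find_best_value arr target)

-- ===== LEMMAS AND PROOFS =====

-- capped sum is monotone in the cap
lemma altCapped_mono (arr : List Int) {v w : Int} (h : v ≤ w) :
    altCapped arr v ≤ altCapped arr w := by
  induction arr with
  | nil => simp [altCapped]
  | cons x t ih =>
    simp only [altCapped, List.map_cons, List.sum_cons] at *
    have : (if x ≤ v then x else v) ≤ (if x ≤ w then x else w) := by split_ifs <;> omega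
    omega

-- and strictly monotone as long as some element is ≥ the larger cap
lemma altCapped_strict (arr : List Int) {v w x : Int} (hvw : v < w) (hx : x ∈ arr)
    (hwx : w ≤ x) : altCapped arr v < altCapped arr w := by
  induction arr with
  | nil => simp at hx
  | cons y t ih =>
    simp only [altCapped, List.map_cons, List.sum_cons] at *
    rcases List.mem_cons.mp hx with rfl | hmem
    · have h1 : (if x ≤ v then x else v) < (if x ≤ w then x else w) := by split_ifs <;> omega
      have h2 := altCapped_mono t (le_of_lt hvw)
      simp only [altCapped] at h2
      omega
    · have h1 : (if y ≤ v then y else v) ≤ (if y ≤ w then y else w) := by split_ifs <;> omega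
      have h2 := ih hmem
      omega

-- capped sum only depends on the multiset of elements
lemma altCapped_perm {arr brr : List Int} (h : arr.Perm brr) (v : Int) :
    altCapped arr v = altCapped brr v := by
  unfold altCapped
  exact List.Perm.sum_eq (h.map _)

-- prefix-sum lookup: scanl (+) a at index i is a + sum of the first i elements
lemma scanl_add_getD (s : List Int) (a : Int) (i : Nat) (h : i ≤ s.length) :
    (s.scanl (· + ·) a).getD i 0 = a + (s.take i).sum := by
  induction s generalizing a i with
  | nil =>
    have : i = 0 := by simpa using h
    simp [this]
  | cons x t ih =>
    cases i with
    | zero => simp [List.scanl_cons]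
    | succ j =>
      rw [List.scanl_cons, List.getD_cons_succ, ih (a + x) j (by simpa using h)]
      simp only [List.take_succ_cons, List.sum_cons]
      ring

-- A's current_sum equals B's capped sum (on the sorted list)
lemma curA_eq (s : List Int) (hs : s.Pairwise (· ≤ ·)) (v : Int) :
    (s.scanl (· + ·) 0).getD (PySem.List.bisectRight s v) 0 +
      ((s.length : Int) - (PySem.List.bisectRight s v : Int)) * v = altCapped s v := by
  obtain ⟨h1, h2, h3⟩ := PySem.List.bisectRight_spec s v hs
  set idx := PySem.List.bisectRight s v with hidx
  rw [scanl_add_getD s 0 idx h1, zero_add]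
  have hsplit : altCapped s v = altCapped (s.take idx) v + altCapped (s.drop idx) v := by
    unfold altCapped
    conv_lhs => rw [← List.take_append_drop idx s]
    rw [List.map_append, List.sum_append]
  have htake : altCapped (s.take idx) v = (s.take idx).sum := by
    unfold altCapped
    have : ∀ x ∈ s.take idx, (if x ≤ v then x else v) = x := by
      intro x hx
      rw [List.mem_take_iff_getElem] at hx
      obtain ⟨i, hi, rfl⟩ := hx
      have := h2 i (by omega) (by omega)
      simp [this]
    rw [List.map_congr_left this, List.map_id']
  have hdrop : altCapped (s.drop idx) v = ((s.length - idx : Nat) : Int) * v := by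
    unfold altCapped
    have : ∀ x ∈ s.drop idx, (if x ≤ v then x else v) = v := by
      intro x hx
      rw [List.mem_drop_iff_getElem] at hx
      obtain ⟨i, hi, rfl⟩ := hx
      have := h3 (idx + i) (by omega) (by omega)
      have : ¬ s[idx + i] ≤ v := by omega
      simp [this]
    rw [List.map_congr_left this]
    rw [show (fun (_ : Int) => v) = (fun (_ : Int) => v) from rfl]
    have := PySem.List.sum_map_const_int (s.drop idx) v
    rw [this, List.length_drop]
  rw [hsplit, htake, hdrop]
  push_cast [h1]
  ring

-- the least candidate L in [0, m] with capped(L) ≥ target (or m if there is none):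
-- binary search target
def leastGe (f : Int → Int) (target m : Int) : Int :=
  if h : ∃ k : Nat, k ≤ m.toNat ∧ target ≤ f k then (Nat.find h : Int) else m

lemma leastGe_bounds (f : Int → Int) (target m : Int) (hm : 0 ≤ m) :
    0 ≤ leastGe f target m ∧ leastGe f target m ≤ m := by
  unfold leastGe
  split
  · rename_i h
    have := (Nat.find_spec h).1
    constructor
    · positivity
    · omega
  · omega

lemma leastGe_lt (f : Int → Int) (target m : Int) (hm : 0 ≤ m) {v : Int}
    (h0 : 0 ≤ v) (hv : v < leastGe f target m) : f v < target := by
  have hv' : ((v.toNat : Int)) = v := by omega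
  by_contra hc
  have hc' : target ≤ f v := by omega
  unfold leastGe at hv
  split at hv
  · rename_i h
    have hb := (Nat.find_spec h).1
    exact absurd ⟨by omega, by rw [hv']; exact hc'⟩ (Nat.find_min h (m := v.toNat) (by omega))
  · rename_i h
    exact h ⟨v.toNat, by omega, by rw [hv']; exact hc'⟩

lemma leastGe_ge (f : Int → Int) (target m : Int) (hm : 0 ≤ m) :
    target ≤ f (leastGe f target m) ∨ leastGe f target m = m := by
  unfold leastGe
  split
  · rename_i h
    exact Or.inl (Nat.find_spec h).2
  · exact Or.inr rfl

-- binary-search correctness: altSearch finds L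
lemma altSearch_eq (arr : List Int) (target : Int) (m L : Int)
    (hL0 : 0 ≤ L) (hLm : L ≤ m)
    (hlt : ∀ v, 0 ≤ v → v < L → altCapped arr v < target)
    (hge : target ≤ altCapped arr L ∨ L = m)
    (hmono : ∀ v w, 0 ≤ v → v < w → w ≤ m → altCapped arr v < altCapped arr w) :
    ∀ (lo hi : Int), 0 ≤ lo → lo ≤ L → L ≤ hi → hi ≤ m →
      altSearch arr target lo hi = L := by
  have main : ∀ (n : Nat) (lo hi : Int), (hi - lo).toNat ≤ n → 0 ≤ lo → lo ≤ L → L ≤ hi →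
      hi ≤ m → altSearch arr target lo hi = L := by
    intro n
    induction n with
    | zero =>
      intro lo hi hn h0 hloL hLhi hhim
      rw [altSearch]
      have hnl : ¬ lo < hi := by omega
      simp only [hnl, dite_false]
      omega
    | succ n ih =>
      intro lo hi hn h0 hloL hLhi hhim
      rw [altSearch]
      by_cases hlh : lo < hi
      · simp only [hlh, dite_true]
        have hmid := PySem.Int.floordiv_two_mid_bounds (le_of_lt hlh)
        have hmidlt : PySem.Int.floordiv (lo + hi) 2 < hi :=
          (PySem.Int.floordiv_lt_iff_lt_mul (by omega)).mpr (by omega)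
        set mid := PySem.Int.floordiv (lo + hi) 2 with hm
        by_cases hc : altCapped arr mid < target
        · simp only [hc, if_true]
          refine ih _ _ (by omega) (by omega) ?_ hLhi hhim
          by_contra hLl
          push_neg at hLl
          have hLmid : L ≤ mid := by omega
          rcases hge with hge | hLem
          · have hle : altCapped arr L ≤ altCapped arr mid := by
              rcases eq_or_lt_of_le hLmid with rfl | hlt2
              · exact le_refl _
              · exact le_of_lt (hmono L mid hL0 hlt2 (by omega))
            omega
          · omega
        · simp only [hc, if_false]
          refine ih _ _ (by omega) h0 hloL ?_ (by omega)
          by_contra hml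
          push_neg at hml
          exact hc (hlt mid (by omega) (by omega))
      · simp only [hlh, dite_false]
        omega
  intro lo hi h0 hloL hLhi hhim
  exact main (hi - lo).toNat lo hi (le_refl _) h0 hloL hLhi hhim

-- A's loop characterised: state after candidates 0..k
lemma foldA_char (f : Int → Int) (target m : Int) (hm : 0 ≤ m)
    (hmono : ∀ v w, 0 ≤ v → v < w → w ≤ m → f v < f w) :
    ∀ k : Int, 0 ≤ k → k ≤ m →
      ((PySem.List.pyRange 0 (k + 1) 1).foldl
        (fun (st : Int × Option Int) v =>
          let d := |f v - target|
          match st.2 with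
          | none => (v, some d)
          | some md => if d < md then (v, some d) else st)
        ((0 : Int), (none : Option Int)))
      = (if k < leastGe f target m then (k, some (|f k - target|))
         else
           (if 0 < leastGe f target m ∧
               |f (leastGe f target m - 1) - target| ≤ |f (leastGe f target m) - target|
            then (leastGe f target m - 1, some (|f (leastGe f target m - 1) - target|))
            else (leastGe f target m, some (|f (leastGe f target m) - target|)))) := by
  obtain ⟨hL0, hLm⟩ := leastGe_bounds f target m hm
  set L := leastGe f target m with hLdef
  set step := (fun (st : Int × Option Int) v =>
      let d := |f v - target|
      match st.2 with
      | none => (v, some d)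
      | some md => if d < md then (v, some d) else st) with hstepdef
  have hstep : ∀ (a d v : Int), step (a, some d) v =
      if |f v - target| < d then (v, some (|f v - target|)) else (a, some d) := by
    intro a d v; rfl
  have main : ∀ k : Int, 0 ≤ k → k ≤ m →
      ((PySem.List.pyRange 0 (k + 1) 1).foldl step ((0 : Int), (none : Option Int)))
      = (if k < L then (k, some (|f k - target|))
         else
           (if 0 < L ∧ |f (L - 1) - target| ≤ |f L - target|
            then (L - 1, some (|f (L - 1) - target|))
            else (L, some (|f L - target|)))) := by
    intro k hk0
    induction k, hk0 using Int.le_induction with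
    | base =>
      intro _
      rw [show ((0 : Int) + 1) = 0 + 1 from rfl, PySem.List.pyRange_one_singleton,
        List.foldl_cons, List.foldl_nil]
      by_cases hL : (0 : Int) < L
      · rw [if_pos hL]
      · have hLz : L = 0 := by omega
        rw [if_neg hL, if_neg (by intro hc; omega), hLz]
    | succ n hn ihP =>
      intro hn1m
      have hnm : n ≤ m := by omega
      have IH := ihP hnm
      rw [PySem.List.pyRange_one_succ_right (by omega : (0 : Int) ≤ n + 1),
        List.foldl_append, IH, List.foldl_cons, List.foldl_nil]
      by_cases h1 : n + 1 < L
      · have h2 : n < L := by omega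
        have hfn1 : f (n + 1) < target := leastGe_lt f target m hm (by omega) h1
        have hfn : f n < f (n + 1) := hmono n (n + 1) hn (by omega) (by omega)
        have hgn : |f n - target| = target - f n := by rw [abs_of_nonpos (by omega)]; ring
        have hgn1 : |f (n + 1) - target| = target - f (n + 1) := by
          rw [abs_of_nonpos (by omega)]; ring
        have hc1 : |f (n + 1) - target| < |f n - target| := by rw [hgn, hgn1]; omega
        rw [if_pos h2, hstep, if_pos hc1, if_pos h1]
      · by_cases h2 : n < L
        · have hLn : L = n + 1 := by omega
          have h3' : |f (L - 1) - target| = |f n - target| := by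
            rw [show L - 1 = n by omega]
          have h4' : |f L - target| = |f (n + 1) - target| := by rw [hLn]
          rw [if_pos h2, hstep, if_neg h1]
          by_cases h3 : |f (L - 1) - target| ≤ |f L - target|
          · have hcond : 0 < L ∧ |f (L - 1) - target| ≤ |f L - target| := ⟨by omega, h3⟩
            have h3n : |f n - target| ≤ |f (n + 1) - target| := by rw [h3', h4'] at h3; exact h3
            rw [if_pos hcond, if_neg (not_lt.mpr h3n), h3', show L - 1 = n by omega]
          · have h3n : |f (n + 1) - target| < |f n - target| := by rw [h3', h4'] at h3; omega
            rw [if_pos h3n,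
              if_neg (show ¬(0 < L ∧ |f (L - 1) - target| ≤ |f L - target|) from
                fun hc => h3 hc.2), hLn]
        · have hLle : L ≤ n := by omega
          have hLltm : L < m := by omega
          have htL : target ≤ f L := by
            rcases leastGe_ge f target m hm with h | h
            · exact h
            · omega
          have hfLn1 : f L < f (n + 1) := hmono L (n + 1) hL0 (by omega) (by omega)
          have hgL : |f L - target| = f L - target := abs_of_nonneg (by omega)
          have hgn1 : |f (n + 1) - target| = f (n + 1) - target := abs_of_nonneg (by omega)
          have hLn1 : |f L - target| ≤ |f (n + 1) - target| := by rw [hgL, hgn1]; omega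
          rw [if_neg h2, if_neg h1]
          by_cases h3 : 0 < L ∧ |f (L - 1) - target| ≤ |f L - target|
          · rw [if_pos h3, hstep, if_neg (not_lt.mpr (le_trans h3.2 hLn1))]
          · rw [if_neg h3, hstep, if_neg (not_lt.mpr hLn1)]
  exact main

-- the two ports agree
lemma ports_agree (arr : List Int) (target : Int) (hpre : arr ≠ []) :
    find_best_value arr target = find_best_value_alt arr target := by
  have hperm : (PySem.List.sorted arr (fun x => x)).Perm arr :=
    PySem.List.sorted_perm arr (fun x => x) false
  set s := PySem.List.sorted arr (fun x => x) with hsdef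
  have hs : s.Pairwise (· ≤ ·) := PySem.List.sorted_pairwise arr (fun x => x)
  -- max over s and over arr agree
  obtain ⟨xa, hxa⟩ : ∃ x, PySem.List.max? s (fun x => x) = some x := by
    rcases hq : PySem.List.max? s (fun x => x) with _ | x
    · have hsnil : s = [] := (PySem.List.max?_eq_none_iff s (fun x => x)).mp hq
      rw [hsnil] at hperm
      exact absurd (List.Perm.nil_eq hperm).symm hpre
    · exact ⟨x, rfl⟩
  obtain ⟨xb, hxb⟩ : ∃ x, PySem.List.max? arr (fun x => x) = some x := by
    rcases hq : PySem.List.max? arr (fun x => x) with _ | x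
    · exact absurd ((PySem.List.max?_eq_none_iff arr (fun x => x)).mp hq) hpre
    · exact ⟨x, rfl⟩
  have hmaxeq : xa = xb := by
    have h1 := PySem.List.max?_isMax hxa xb ((hperm.mem_iff).mpr (PySem.List.max?_mem hxb))
    have h2 := PySem.List.max?_isMax hxb xa ((hperm.mem_iff).mp (PySem.List.max?_mem hxa))
    omega
  subst hmaxeq
  set m := xa with hmdef
  have hmem : m ∈ arr := PySem.List.max?_mem hxb
  have hmono : ∀ v w : Int, 0 ≤ v → v < w → w ≤ m → altCapped arr v < altCapped arr w :=
    fun v w _ hvw hwm => altCapped_strict arr hvw hmem hwm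
  -- A's per-candidate sum is B's capped sum
  have hcur : ∀ v : Int,
      PySem.List.pyGetD (s.scanl (· + ·) 0) ((PySem.List.bisectRight s v : Nat) : Int) 0 +
        (PySem.List.len s - ((PySem.List.bisectRight s v : Nat) : Int)) * v =
      altCapped arr v := by
    intro v
    rw [PySem.List.pyGetD_natCast, PySem.List.len_eq, curA_eq s hs v, altCapped_perm hperm]
  simp only [find_best_value, find_best_value_alt, ← hsdef, hxa, hxb, Option.getD_some]
  have hstepeq : (fun (st : Int × Option Int) candidate_value =>
      match st.2 with
      | none => (candidate_value, some (|PySem.List.pyGetD (s.scanl (· + ·) 0)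
          ((PySem.List.bisectRight s candidate_value : Nat) : Int) 0 +
          (PySem.List.len s - ((PySem.List.bisectRight s candidate_value : Nat) : Int)) *
            candidate_value - target|))
      | some md =>
          if |PySem.List.pyGetD (s.scanl (· + ·) 0)
              ((PySem.List.bisectRight s candidate_value : Nat) : Int) 0 +
              (PySem.List.len s -
                ((PySem.List.bisectRight s candidate_value : Nat) : Int)) * candidate_value -
              target| < md
          then (candidate_value, some (|PySem.List.pyGetD (s.scanl (· + ·) 0)
              ((PySem.List.bisectRight s candidate_value : Nat) : Int) 0 +
              (PySem.List.len s -
                ((PySem.List.bisectRight s candidate_value : Nat) : Int)) * candidate_value -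
              target|))
          else st) =
      (fun (st : Int × Option Int) v =>
        let d := |altCapped arr v - target|
        match st.2 with
        | none => (v, some d)
        | some md => if d < md then (v, some d) else st) := by
    funext st v
    rw [show (PySem.List.pyGetD (s.scanl (· + ·) 0)
        ((PySem.List.bisectRight s v : Nat) : Int) 0 +
        (PySem.List.len s - ((PySem.List.bisectRight s v : Nat) : Int)) * v) =
        altCapped arr v from hcur v]
  by_cases hm : (0 : Int) ≤ m
  · -- the generic characterisation applies
    obtain ⟨hL0, hLm⟩ := leastGe_bounds (altCapped arr) target m hm
    have hfold := foldA_char (altCapped arr) target m hm hmono m hm le_rfl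
    have hsearch := altSearch_eq arr target m (leastGe (altCapped arr) target m) hL0 hLm
      (fun v h0 hv => leastGe_lt (altCapped arr) target m hm h0 hv)
      (leastGe_ge (altCapped arr) target m hm) hmono 0 m le_rfl hL0 hLm le_rfl
    rw [hstepeq, hfold, if_neg (by omega), max_eq_left hm, hsearch]
    split
    · rfl
    · rfl
  · -- max(arr) < 0: A's range is empty and B's search interval is [0, 0]
    rw [PySem.List.pyRange_one_eq_nil (by omega), max_eq_right (by omega : m ≤ (0 : Int))]
    rw [altSearch]
    norm_num

-- ===== VERDICT (by name: the statement is the Claim_ definition above) =====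
theorem find_best_value_spec : Claim_equal_find_best_value := by
  intro arr target _ hpre
  exact ports_agree arr target hpre
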